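-- pv_equiv track=rewrite | github.com/levelgigio/gambler | statistics.py | break_string_on_change
-- ===== SOURCE A (Python) =====
-- def break_string_on_change(string):
--     result = ""
--     previous_char = ""
--
--     for char in string:
--         if char != previous_char:
--             result += "\n"
--         result += char
--         previous_char = char
--
--     return result.strip()
-- ===== SOURCE B (Python) =====
-- def break_string_on_change(string):
--     # Collect maximal runs of equal characters by scanning run boundaries,
--     # then join the runs with newlines and strip, instead of per-char state tracking.
--     runs = []
--     i, n = 0, len(string)
--     while i < n:
--         j = i + 1
--         while j < n and string[j] == string[i]:
--             j += 1
--         runs.append(string[i:j])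
--         i = j
--     return "\n".join(runs).strip()
-- ===== Notes on version B (the rewrite author's own statement) =====
-- stated objective: alternative
-- what changed: Replaces the per-character previous_char/result accumulation with extraction of maximal equal-character runs (inner boundary scan) followed by a single newline-join and strip.
import Mathlib
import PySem

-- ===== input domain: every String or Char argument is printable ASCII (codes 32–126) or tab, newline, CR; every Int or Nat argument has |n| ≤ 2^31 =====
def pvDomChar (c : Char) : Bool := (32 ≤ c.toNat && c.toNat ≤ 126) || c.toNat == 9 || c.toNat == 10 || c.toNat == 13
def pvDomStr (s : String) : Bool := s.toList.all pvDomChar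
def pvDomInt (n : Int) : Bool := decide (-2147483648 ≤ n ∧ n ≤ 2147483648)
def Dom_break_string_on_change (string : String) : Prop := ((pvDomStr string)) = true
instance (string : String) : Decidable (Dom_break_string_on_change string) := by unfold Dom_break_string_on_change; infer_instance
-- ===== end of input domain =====

-- B replaces A's per-character previous_char tracking by extracting maximal runs of equal
-- characters and joining them with newlines (alternative decomposition, same cost).

-- ===== PORT A =====
def break_string_on_change (string : String) : String :=
  String.ofList (PySem.Chars.strip
    (string.toList.foldl
      (fun (st : List Char × List Char) c =>
        ((if ([c] : List Char) ≠ st.2 then st.1 ++ ['\n'] else st.1) ++ [c], [c]))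
      ([], [])).1)

-- ===== PORT B =====
-- inner while loop: consume the run of characters equal to c
def pvTakeRun (c : Char) : List Char → List Char × List Char
  | [] => ([], [])
  | x :: xs =>
    if x = c then
      let p := pvTakeRun c xs
      (x :: p.1, p.2)
    else ([], x :: xs)

theorem pvTakeRun_len (c : Char) (xs : List Char) : (pvTakeRun c xs).2.length ≤ xs.length := by
  induction xs with
  | nil => simp [pvTakeRun]
  | cons x xs ih =>
    simp only [pvTakeRun]
    split
    · exact le_trans ih (Nat.le_succ _)
    · simp

-- outer while loop: collect the maximal runs in order
def pvRuns : List Char → List (List Char)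
  | [] => []
  | c :: xs =>
    let p := pvTakeRun c xs
    (c :: p.1) :: pvRuns p.2
termination_by l => l.length
decreasing_by
  simpa using Nat.lt_succ_of_le (pvTakeRun_len c xs)

def break_string_on_change_alt (string : String) : String :=
  String.ofList (PySem.Chars.strip (PySem.Chars.join ['\n'] (pvRuns string.toList)))

-- ===== PRECONDITION & SPEC =====
def Spec_break_string_on_change (string : String) (out : String) : Prop := out = break_string_on_change_alt string
instance (string : String) (out : String) : Decidable (Spec_break_string_on_change string out) := by unfold Spec_break_string_on_change; infer_instance

-- ===== CLAIM (what is proved, stated in full; the proofs are below) =====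
def Claim_equal_break_string_on_change : Prop := ∀ (string : String), Dom_break_string_on_change string → Spec_break_string_on_change string (break_string_on_change string)

-- ===== LEMMAS AND PROOFS =====

-- characters emitted by A's loop given the previous_char state
def pvEmit : List Char → List Char → List Char
  | [], _ => []
  | c :: xs, prev => (if ([c] : List Char) ≠ prev then ['\n'] else []) ++ c :: pvEmit xs [c]

theorem pvFold_eq_emit (l : List Char) (acc prev : List Char) :
    (l.foldl
      (fun (st : List Char × List Char) c =>
        ((if ([c] : List Char) ≠ st.2 then st.1 ++ ['\n'] else st.1) ++ [c], [c]))
      (acc, prev)).1 = acc ++ pvEmit l prev := by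
  induction l generalizing acc prev with
  | nil => simp [pvEmit]
  | cons c xs ih =>
    simp only [List.foldl_cons, pvEmit, ih]
    split <;> simp

-- newline-prefixed concatenation of the runs
def pvFlat (rs : List (List Char)) : List Char := rs.flatMap (fun r => '\n' :: r)

theorem pvEmit_eq_takeRun : ∀ (n : Nat) (l : List Char), l.length ≤ n → ∀ c : Char,
    pvEmit l [c] = (pvTakeRun c l).1 ++ pvFlat (pvRuns (pvTakeRun c l).2) := by
  intro n
  induction n with
  | zero =>
    intro l hl c
    have h : l = [] := List.eq_nil_of_length_eq_zero (Nat.le_zero.mp hl)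
    subst h
    simp [pvEmit, pvTakeRun, pvRuns, pvFlat]
  | succ n ih =>
    intro l hl c
    match l with
    | [] => simp [pvEmit, pvTakeRun, pvRuns, pvFlat]
    | x :: xs =>
      have hxs : xs.length ≤ n := Nat.lt_succ_iff.mp (by simpa using hl)
      have ihx := ih xs hxs x
      by_cases hx : x = c
      · subst hx
        simp [pvEmit, pvTakeRun, ihx]
      · simp [pvEmit, pvTakeRun, hx, pvRuns, pvFlat, ihx]

theorem pvEmit_nil_prev (l : List Char) : pvEmit l [] = pvFlat (pvRuns l) := by
  match l with
  | [] => simp [pvEmit, pvRuns, pvFlat]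
  | c :: xs =>
    have h := pvEmit_eq_takeRun xs.length xs le_rfl c
    simp [pvEmit, h, pvRuns, pvFlat]

theorem pvFlat_cons_eq (r : List Char) (rs : List (List Char)) :
    pvFlat (r :: rs) = '\n' :: PySem.Chars.join ['\n'] (r :: rs) := by
  induction rs generalizing r with
  | nil => simp [pvFlat, PySem.Chars.join_singleton]
  | cons b t ih =>
    have : pvFlat (r :: b :: t) = '\n' :: r ++ pvFlat (b :: t) := by simp [pvFlat]
    rw [this, ih b, PySem.Chars.join_cons_cons]
    simp

theorem pvStrip_newline (t : List Char) : PySem.Chars.strip ('\n' :: t) = PySem.Chars.strip t := by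
  simp [PySem.Chars.strip, PySem.Chars.lstrip, PySem.Chars.isspace, List.dropWhile]

theorem pvStrip_flat (rs : List (List Char)) :
    PySem.Chars.strip (pvFlat rs) = PySem.Chars.strip (PySem.Chars.join ['\n'] rs) := by
  match rs with
  | [] => rfl
  | r :: t => rw [pvFlat_cons_eq, pvStrip_newline]

-- ===== VERDICT (by name: the statement is the Claim_ definition above) =====
theorem break_string_on_change_spec : Claim_equal_break_string_on_change := by
  intro s _
  unfold Spec_break_string_on_change break_string_on_change break_string_on_change_alt
  rw [pvFold_eq_emit, List.nil_append, pvEmit_nil_prev, pvStrip_flat]
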